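-- pv_equiv track=rewrite | github.com/Marinel444/drivers | src/drivers_marinel/race_report.py | sorted_time_racer
-- ===== SOURCE A (Python) =====
-- def sorted_time_racer(lap_time, desc=False):
--     sorted_best_time_dict = {}
--     racer_best_time = sorted(lap_time.values())
--     if desc:
--         racer_best_time.reverse()
--     for timer in racer_best_time:
--         for abbr, best_time in lap_time.items():
--             if timer == best_time:
--                 sorted_best_time_dict[abbr] = best_time
--     return sorted_best_time_dict
-- ===== SOURCE B (Python) =====
-- def sorted_time_racer(lap_time, desc=False):
--     groups = {}
--     for abbr, best_time in lap_time.items():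
--         groups.setdefault(best_time, []).append(abbr)
--     result = {}
--     for timer in sorted(groups, reverse=desc):
--         for abbr in groups[timer]:
--             result[abbr] = timer
--     return result
-- ===== Notes on version B (the rewrite author's own statement) =====
-- stated objective: faster
-- what changed: Instead of sorting all values and rescanning the whole dict once per value (quadratic), B builds a time->racers grouping index in one pass, sorts the distinct times once, and emits each bucket.
import Mathlib
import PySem

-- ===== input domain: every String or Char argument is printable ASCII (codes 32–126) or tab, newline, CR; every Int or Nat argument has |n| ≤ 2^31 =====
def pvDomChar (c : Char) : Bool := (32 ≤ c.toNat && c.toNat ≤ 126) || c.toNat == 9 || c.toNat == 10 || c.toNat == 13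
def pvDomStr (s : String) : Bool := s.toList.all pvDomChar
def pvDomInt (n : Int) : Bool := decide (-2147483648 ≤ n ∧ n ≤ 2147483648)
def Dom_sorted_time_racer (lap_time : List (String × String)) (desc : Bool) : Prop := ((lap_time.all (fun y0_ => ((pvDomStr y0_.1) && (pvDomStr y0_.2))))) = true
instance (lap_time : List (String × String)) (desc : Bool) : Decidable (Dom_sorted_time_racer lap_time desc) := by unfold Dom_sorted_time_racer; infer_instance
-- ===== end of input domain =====

-- B replaces A's sort-all-values-then-rescan-the-dict-per-value by a one-pass time->racers
-- grouping index, one sort of the distinct times, and an emit of each bucket (objective: faster).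

-- ===== PORT A =====
def sorted_time_racer (lap_time : List (String × String)) (desc : Bool) : List (String × String) :=
  -- sorted_best_time_dict = {} ; racer_best_time = sorted(lap_time.values())
  let racer_best_time := PySem.List.sorted (lap_time.map Prod.snd) (fun x => x) false
  -- if desc: racer_best_time.reverse()
  let racer_best_time := if desc then racer_best_time.reverse else racer_best_time
  -- for timer in racer_best_time: for abbr, best_time in lap_time.items(): if timer == best_time: d[abbr] = best_time
  let d := racer_best_time.foldl (fun d timer =>
      lap_time.foldl (fun d kv => if timer == kv.2 then d.insert kv.1 kv.2 else d) d)
    (PySem.Dict.empty : PySem.Dict String String)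
  d.items

-- ===== PORT B =====
def sorted_time_racer_alt (lap_time : List (String × String)) (desc : Bool) : List (String × String) :=
  -- groups = {} ; for abbr, best_time in lap_time.items(): groups.setdefault(best_time, []).append(abbr)
  let groups := lap_time.foldl (fun g kv => g.modify kv.2 [] (fun l => l ++ [kv.1]))
    (PySem.Dict.empty : PySem.Dict String (List String))
  -- for timer in sorted(groups, reverse=desc): for abbr in groups[timer]: result[abbr] = timer
  let times := PySem.List.sorted groups.keys (fun x => x) desc
  let result := times.foldl (fun r t => (groups.getD t []).foldl (fun r a => r.insert a t) r)
    (PySem.Dict.empty : PySem.Dict String String)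
  result.items

-- ===== PRECONDITION & SPEC =====
-- Pre_ excludes association lists with duplicate keys: they do not represent any Python dict
-- (a dict's keys are distinct), so A is never called on them.
def Pre_sorted_time_racer (lap_time : List (String × String)) (desc : Bool) : Prop :=
  (lap_time.map Prod.fst).Nodup
instance (lap_time : List (String × String)) (desc : Bool) : Decidable (Pre_sorted_time_racer lap_time desc) := by unfold Pre_sorted_time_racer; infer_instance
def pvWitness_sorted_time_racer : (List (String × String)) × Bool :=
  ([("SVF", "1:04.415"), ("DRR", "1:12.013"), ("LHM", "1:04.415")], false)
def Spec_sorted_time_racer (lap_time : List (String × String)) (desc : Bool) (out : List (String × String)) : Prop := out = sorted_time_racer_alt lap_time desc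
instance (lap_time : List (String × String)) (desc : Bool) (out : List (String × String)) : Decidable (Spec_sorted_time_racer lap_time desc out) := by unfold Spec_sorted_time_racer; infer_instance

-- ===== CLAIM (what is proved, stated in full; the proofs are below) =====
def Claim_equal_sorted_time_racer : Prop := ∀ (lap_time : List (String × String)) (desc : Bool), Dom_sorted_time_racer lap_time desc → Pre_sorted_time_racer lap_time desc → Spec_sorted_time_racer lap_time desc (sorted_time_racer lap_time desc)

-- ===== LEMMAS AND PROOFS =====

theorem pv_get?_foldl_insert_not_mem (l : List (String × String)) (d : PySem.Dict String String)
    (k : String) (h : k ∉ l.map Prod.fst) :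
    (l.foldl (fun d kv => d.insert kv.1 kv.2) d).get? k = d.get? k := by
  induction l generalizing d with
  | nil => rfl
  | cons p rest ih =>
    simp only [List.map_cons, List.mem_cons, not_or] at h
    simp only [List.foldl_cons]
    rw [ih _ h.2, PySem.Dict.get?_insert_of_ne _ _ h.1]

def pvGpass (lap : List (String × String)) (t : String) (d : PySem.Dict String String) : PySem.Dict String String :=
  (lap.filter (fun kv => kv.2 == t)).foldl (fun d kv => d.insert kv.1 kv.2) d

def pvDone (lap : List (String × String)) (d : PySem.Dict String String) (t : String) : Prop :=
  ∀ kv ∈ lap.filter (fun kv => kv.2 == t), d.get? kv.1 = some kv.2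

theorem pv_get?_foldl_insert_self (l : List (String × String)) (hl : (l.map Prod.fst).Nodup)
    (d : PySem.Dict String String) :
    ∀ kv ∈ l, (l.foldl (fun d kv => d.insert kv.1 kv.2) d).get? kv.1 = some kv.2 := by
  induction l generalizing d with
  | nil => intro kv h; cases h
  | cons p rest ih =>
    simp only [List.map_cons, List.nodup_cons] at hl
    intro kv hkv
    rcases List.mem_cons.1 hkv with rfl | hmem
    · simp only [List.foldl_cons]
      rw [pv_get?_foldl_insert_not_mem _ _ _ hl.1, PySem.Dict.get?_insert_self]
    · exact ih hl.2 _ kv hmem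

theorem pv_nodup_filter_fst (lap : List (String × String)) (hl : (lap.map Prod.fst).Nodup)
    (p : String × String → Bool) : ((lap.filter p).map Prod.fst).Nodup :=
  hl.sublist (List.Sublist.map Prod.fst List.filter_sublist)

theorem pv_gpass_keys_nodup (lap : List (String × String)) (t : String)
    (d : PySem.Dict String String) (hnd : d.keys.Nodup) : (pvGpass lap t d).keys.Nodup :=
  PySem.Dict.nodup_keys_foldl_insert_key _ Prod.fst (fun _ kv => kv.2) d hnd

theorem pv_done_after (lap : List (String × String)) (hl : (lap.map Prod.fst).Nodup)
    (t : String) (d : PySem.Dict String String) : pvDone lap (pvGpass lap t d) t :=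
  fun kv hkv => pv_get?_foldl_insert_self _ (pv_nodup_filter_fst lap hl _) d kv hkv

theorem pv_done_persist (lap : List (String × String)) (hl : (lap.map Prod.fst).Nodup)
    (t u : String) (hne : u ≠ t) (d : PySem.Dict String String)
    (hdone : pvDone lap d u) : pvDone lap (pvGpass lap t d) u := by
  intro kv hkv
  have hnot : kv.1 ∉ (lap.filter (fun kv => kv.2 == t)).map Prod.fst := by
    intro hmem
    rcases List.mem_map.1 hmem with ⟨kv', hkv', hfst⟩
    have h1 := List.mem_filter.1 hkv
    have h2 := List.mem_filter.1 hkv'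
    have : kv = kv' := List.inj_on_of_nodup_map hl h1.1 h2.1 hfst.symm
    subst this
    exact hne (by
      have e1 : kv.2 = u := by simpa using h1.2
      have e2 : kv.2 = t := by simpa using h2.2
      rw [← e1, e2])
  rw [pvGpass, pv_get?_foldl_insert_not_mem _ _ _ hnot]
  exact hdone kv hkv

theorem pv_insert_same_eq_self (d : PySem.Dict String String) (k v : String)
    (hnd : d.keys.Nodup) (h : d.get? k = some v) : d.insert k v = d := by
  have hc : d.contains k = true := by rw [PySem.Dict.contains_eq_isSome_get?, h]; rfl
  apply PySem.Dict.ext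
  rw [PySem.Dict.items_insert_of_contains d v hc]
  have : ∀ p ∈ d.items, (if (p.1 == k) = true then (k, v) else p) = p := by
    intro p hp
    by_cases hk : p.1 = k
    · have : (k, p.2) ∈ d.items := by rw [← hk]; exact hp
      have := PySem.Dict.get?_of_mem_items d this hnd
      rw [h] at this
      simp [hk, (Option.some.injEq _ _ ▸ this : v = p.2)]
      cases p; simp_all
    · simp [hk]
  calc List.map (fun p => if (p.1 == k) = true then (k, v) else p) d.items
      = List.map id d.items := List.map_congr_left (by simpa using this)
    _ = d.items := List.map_id d.items

theorem pv_gpass_done_eq_aux (l : List (String × String)) :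
    ∀ (d : PySem.Dict String String), d.keys.Nodup → (∀ kv ∈ l, d.get? kv.1 = some kv.2) →
    l.foldl (fun d kv => d.insert kv.1 kv.2) d = d := by
  induction l with
  | nil => intro d _ _; rfl
  | cons p rest ih =>
    intro d hnd h
    simp only [List.foldl_cons]
    rw [pv_insert_same_eq_self d p.1 p.2 hnd (h p (List.mem_cons_self))]
    exact ih d hnd (fun kv hkv => h kv (List.mem_cons_of_mem _ hkv))

theorem pv_gpass_done_eq (lap : List (String × String)) (t : String)
    (d : PySem.Dict String String) (hnd : d.keys.Nodup) (hdone : pvDone lap d t) :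
    pvGpass lap t d = d :=
  pv_gpass_done_eq_aux _ d hnd hdone

theorem pv_fold_dedup (lap : List (String × String)) (hl : (lap.map Prod.fst).Nodup)
    (ts : List String) : ∀ (s : List String) (d : PySem.Dict String String), d.keys.Nodup →
    (∀ u ∈ s, pvDone lap d u) →
    ts.foldl (fun d t => pvGpass lap t d) d =
      ((PySem.Set.ofList ts).filter (fun t => decide (t ∉ s))).foldl (fun d t => pvGpass lap t d) d := by
  induction ts with
  | nil => intro s d _ _; rfl
  | cons t rest ih =>
    intro s d hnd hs
    rw [PySem.Set.ofList_cons]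
    by_cases ht : t ∈ s
    · have h1 : ((t :: (PySem.Set.ofList rest).discard t).filter (fun t => decide (t ∉ s)))
          = (PySem.Set.ofList rest).filter (fun t => decide (t ∉ s)) := by
        simp only [List.filter_cons, ht, not_true_eq_false, decide_false]
        simp only [PySem.Set.discard, List.filter_filter]
        apply List.filter_congr
        intro y _
        by_cases hy : y ∈ s
        · simp [hy]
        · have : y ≠ t := fun e => hy (e ▸ ht)
          simp [hy, this]
      rw [h1, List.foldl_cons, pv_gpass_done_eq lap t d hnd (hs t ht)]
      exact ih s d hnd hs
    · have h1 : ((t :: (PySem.Set.ofList rest).discard t).filter (fun t => decide (t ∉ s)))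
          = t :: (PySem.Set.ofList rest).filter (fun y => decide (y ∉ t :: s)) := by
        simp only [List.filter_cons, ht, not_false_eq_true, decide_true, if_true]
        congr 1
        simp only [PySem.Set.discard, List.filter_filter]
        apply List.filter_congr
        intro y _
        by_cases hy : y ∈ s
        · simp [hy, List.mem_cons]
        · by_cases hyt : y = t
          · simp [hyt]
          · simp [hy, hyt, List.mem_cons]
      rw [h1, List.foldl_cons, List.foldl_cons]
      exact ih (t :: s) (pvGpass lap t d) (pv_gpass_keys_nodup lap t d hnd)
        (by
          intro u hu
          rcases List.mem_cons.1 hu with rfl | hu'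
          · exact pv_done_after lap hl u d
          · exact pv_done_persist lap hl t u (fun e => ht (e ▸ hu')) d (hs u hu'))

theorem pv_pairwise_ofList {α : Type} [BEq α] [LawfulBEq α] (R : α → α → Prop)
    (xs : List α) (h : xs.Pairwise R) : (PySem.Set.ofList xs).Pairwise R := by
  induction xs with
  | nil => exact List.Pairwise.nil
  | cons x rest ih =>
    rw [PySem.Set.ofList_cons]
    rcases List.pairwise_cons.1 h with ⟨hx, hrest⟩
    refine List.pairwise_cons.2 ⟨?_, ?_⟩
    · intro y hy
      have : y ∈ rest := (PySem.Set.mem_ofList _ _).1 ((PySem.Set.mem_discard _ _ _).1 hy).1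
      exact hx y this
    · exact (ih hrest).sublist List.filter_sublist

theorem pv_times_eq (vals : List String) (desc : Bool) :
    PySem.List.sorted (PySem.Set.ofList vals) (fun x => x) desc =
      PySem.Set.ofList (if desc then (PySem.List.sorted vals (fun x => x) false).reverse
        else PySem.List.sorted vals (fun x => x) false) := by
  have hperm : ∀ (l : List String), l.Perm vals →
      (PySem.Set.ofList l).Perm (PySem.Set.ofList vals) := by
    intro l hp
    refine (List.perm_ext_iff_of_nodup (PySem.Set.nodup_ofList l) (PySem.Set.nodup_ofList vals)).2 ?_
    intro a
    rw [PySem.Set.mem_ofList, PySem.Set.mem_ofList]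
    exact hp.mem_iff
  cases desc with
  | false =>
    apply PySem.List.sorted_eq_of_perm_of_pairwise_lt
    · exact hperm _ (PySem.List.sorted_perm vals (fun x => x) false)
    · have hle := pv_pairwise_ofList (fun a b : String => a ≤ b) _
        (PySem.List.sorted_pairwise vals (fun x => x))
      have hne : (PySem.Set.ofList (PySem.List.sorted vals (fun x => x) false)).Pairwise (· ≠ ·) :=
        (PySem.Set.nodup_ofList _)
      exact (hle.and hne).imp (fun h => lt_of_le_of_ne h.1 h.2)
  | true =>
    apply PySem.List.sorted_rev_eq_of_perm_of_pairwise_gt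
    · exact hperm _ ((List.reverse_perm _).trans (PySem.List.sorted_perm vals (fun x => x) false))
    · have hle : ((PySem.List.sorted vals (fun x => x) false).reverse).Pairwise
          (fun a b : String => b ≤ a) :=
        List.pairwise_reverse.2 (PySem.List.sorted_pairwise vals (fun x => x))
      have hge := pv_pairwise_ofList (fun a b : String => b ≤ a) _ hle
      have hne : (PySem.Set.ofList ((PySem.List.sorted vals (fun x => x) false).reverse)).Pairwise (· ≠ ·) :=
        (PySem.Set.nodup_ofList _)
      exact (hge.and hne).imp (fun h => lt_of_le_of_ne h.1 (Ne.symm h.2))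

theorem pv_groups_keys (lap : List (String × String)) :
    (lap.foldl (fun g kv => g.modify kv.2 [] (fun l => l ++ [kv.1]))
      (PySem.Dict.empty : PySem.Dict String (List String))).keys =
    PySem.Set.ofList (lap.map Prod.snd) := by
  rw [PySem.Dict.keys_foldl_modify_key lap Prod.snd [] (fun _ kv => fun l => l ++ [kv.1])]
  rw [PySem.Dict.keys_empty, PySem.Set.update_nil_left]

theorem pv_groups_getD (lap : List (String × String)) (t : String) :
    (lap.foldl (fun g kv => g.modify kv.2 [] (fun l => l ++ [kv.1]))
      (PySem.Dict.empty : PySem.Dict String (List String))).getD t [] =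
    (lap.filter (fun kv => kv.2 == t)).map Prod.fst := by
  have h : lap.foldl (fun g kv => g.modify kv.2 [] (fun l => l ++ [kv.1]))
      (PySem.Dict.empty : PySem.Dict String (List String))
      = (lap.map (fun kv => (kv.2, kv.1))).foldl (fun d p => d.modify p.1 [] (fun l => l ++ [p.2]))
        (PySem.Dict.empty : PySem.Dict String (List String)) := by
    rw [List.foldl_map]
  rw [h, PySem.Dict.getD_foldl_modify_append]
  rw [PySem.Dict.getD_empty]
  rw [List.filter_map]
  simp [List.map_map, Function.comp_def]

theorem pv_inner_a (lap : List (String × String)) (t : String) (d : PySem.Dict String String) :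
    lap.foldl (fun d kv => if t == kv.2 then d.insert kv.1 kv.2 else d) d = pvGpass lap t d := by
  rw [PySem.List.foldl_if_eq_foldl_filter (fun kv => t == kv.2) (fun d kv => d.insert kv.1 kv.2) lap d]
  rw [pvGpass]
  congr 1
  apply List.filter_congr
  intro kv _
  simp [eq_comm]

theorem pv_inner_b (lap : List (String × String)) (t : String) (d : PySem.Dict String String) :
    ((lap.filter (fun kv => kv.2 == t)).map Prod.fst).foldl (fun r a => r.insert a t) d = pvGpass lap t d := by
  rw [List.foldl_map, pvGpass]
  apply PySem.List.foldl_congr_mem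
  intro acc kv hkv
  have := (List.mem_filter.1 hkv).2
  have ht : kv.2 = t := by simpa using this
  rw [ht]

theorem pv_final (lap : List (String × String)) (desc : Bool) (hpre : (lap.map Prod.fst).Nodup) :
    (let racer_best_time := PySem.List.sorted (lap.map Prod.snd) (fun x => x) false
     let racer_best_time := if desc then racer_best_time.reverse else racer_best_time
     let d := racer_best_time.foldl (fun d timer =>
        lap.foldl (fun d kv => if timer == kv.2 then d.insert kv.1 kv.2 else d) d)
      (PySem.Dict.empty : PySem.Dict String String)
     d.items) =
    (let groups := lap.foldl (fun g kv => g.modify kv.2 [] (fun l => l ++ [kv.1]))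
      (PySem.Dict.empty : PySem.Dict String (List String))
     let times := PySem.List.sorted groups.keys (fun x => x) desc
     let result := times.foldl (fun r t => (groups.getD t []).foldl (fun r a => r.insert a t) r)
      (PySem.Dict.empty : PySem.Dict String String)
     result.items) := by
  simp only [pv_inner_a, pv_groups_keys, pv_groups_getD, pv_inner_b, pv_times_eq]
  congr 1
  rw [pv_fold_dedup lap hpre _ [] _ (by exact PySem.Dict.nodup_keys_empty) (by intro u hu; cases hu)]
  congr 1
  simp

-- ===== VERDICT (by name: the statement is the Claim_ definition above) =====
theorem sorted_time_racer_spec : Claim_equal_sorted_time_racer := by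
  intro lap_time desc _ hpre
  unfold Spec_sorted_time_racer sorted_time_racer sorted_time_racer_alt
  exact pv_final lap_time desc hpre
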